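-- pv_equiv track=rewrite | github.com/XiaoCaoAskedForHelp/LeetCode-Py | Solution2105给植物浇水II.py | minimumRefill1
-- ===== SOURCE A (Python) =====
-- from typing import List
--
-- def minimumRefill1(plants: List[int], capacityA: int, capacityB: int) -> int:
--     ans = 0
--     a, b = capacityA, capacityB
--     i, j = 0, len(plants) - 1
--     while i < j:
--         # Alice 给植物i浇水
--         if a < plants[i]:
--             # 没有足够的水,返回起点重新装满水罐
--             ans += 1
--             a = capacityA
--         a -= plants[i]
--         i += 1
--         # Bob给植物j浇水
--         if b < plants[j]:
--             # 没有足够的水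
--             ans += 1
--             b = capacityB
--         b -= plants[j]
--         j -= 1
--     # Alice 和 Bob到达同一株植物，那么当前水罐中水更多的人会给这株植物浇水
--     if i == j and max(a, b) < plants[i]:
--         # 没有足够多的水
--         ans += 1
--     return ans
-- ===== SOURCE B (Python) =====
-- def minimumRefill1(plants, capacityA, capacityB):
--     # Prefix-sum reformulation: a refill happens exactly when the cumulative
--     # load since the last reset exceeds the capacity, so instead of tracking
--     # water levels we build the prefix-sum array S once and track only the
--     # prefix-sum value at the last refill ("base"): refill at i iff
--     # S[i+1] - base > cap, and the remaining water is cap - (S[end] - base).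
--     n = len(plants)
--     h = n // 2
--     S = [0]
--     for p in plants:
--         S.append(S[-1] + p)
--     ra, basea = 0, 0
--     for i in range(h):
--         if S[i + 1] - basea > capacityA:
--             ra += 1
--             basea = S[i]
--     rb, baseb = 0, S[n]
--     for j in range(h):
--         idx = n - 1 - j
--         if baseb - S[idx] > capacityB:
--             rb += 1
--             baseb = S[idx + 1]
--     ans = ra + rb
--     if n % 2 == 1:
--         wa = capacityA - (S[h] - basea)
--         wb = capacityB - (baseb - S[n - h])
--         if max(wa, wb) < plants[h]:
--             ans += 1
--     return ans
-- ===== Notes on version B (the rewrite author's own statement) =====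
-- stated objective: alternative
-- what changed: Replaces the two-pointer water-level simulation by a prefix-sum formulation: S is built once, a refill is detected as S[i+1]-base > capacity with base the prefix sum at the last reset, and the leftover water for the middle plant is recovered as capacity-(S[end]-base), so no per-step water variable is maintained.
import Mathlib
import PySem

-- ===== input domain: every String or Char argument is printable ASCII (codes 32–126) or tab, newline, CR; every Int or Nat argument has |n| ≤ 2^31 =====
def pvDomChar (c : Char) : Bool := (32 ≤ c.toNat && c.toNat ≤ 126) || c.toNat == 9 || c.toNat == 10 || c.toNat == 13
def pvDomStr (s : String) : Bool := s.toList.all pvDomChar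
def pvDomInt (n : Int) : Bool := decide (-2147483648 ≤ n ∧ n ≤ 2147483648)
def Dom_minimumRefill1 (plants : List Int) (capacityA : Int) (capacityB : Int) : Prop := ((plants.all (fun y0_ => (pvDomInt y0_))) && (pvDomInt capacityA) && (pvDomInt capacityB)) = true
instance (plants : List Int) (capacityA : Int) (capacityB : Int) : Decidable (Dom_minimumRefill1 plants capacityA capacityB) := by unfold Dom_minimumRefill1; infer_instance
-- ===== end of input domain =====

-- B replaces A's two-pointer water-level simulation by a prefix-sum formulation:
-- refills are detected as S[i+1] - base > capacity (objective: alternative).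

-- ===== PORT A =====
-- one watering step (shared shape of Alice's and Bob's if-block): given the current
-- refill count, water level, capacity and plant, return the new (count, level)
def aStep (ans w cap p : Int) : Int × Int :=
  if w < p then (ans + 1, cap - p) else (ans, w - p)

-- the while-loop of A: state (ans, a, b, i, j); indices are always in range while
-- i < j holds, so the `.getD 0` default of the exact pyGetD access is never used
def aLoop (pl : List Int) (cA cB ans a b i j : Int) : Int × Int × Int × Int × Int :=
  if _h : i < j then
    aLoop pl cA cB
      (aStep (aStep ans a cA (PySem.List.pyGetD pl i 0)).1 b cB (PySem.List.pyGetD pl j 0)).1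
      (aStep ans a cA (PySem.List.pyGetD pl i 0)).2
      (aStep (aStep ans a cA (PySem.List.pyGetD pl i 0)).1 b cB (PySem.List.pyGetD pl j 0)).2
      (i + 1) (j - 1)
  else (ans, a, b, i, j)
termination_by (j - i).toNat
decreasing_by omega

def minimumRefill1 (plants : List Int) (capacityA : Int) (capacityB : Int) : Int :=
  let r := aLoop plants capacityA capacityB 0 capacityA capacityB 0 ((plants.length : Int) - 1)
  -- r = (ans, a, b, i, j); final check `if i == j and max(a,b) < plants[i]`
  if r.2.2.2.1 = r.2.2.2.2 ∧ max r.2.1 r.2.2.1 < PySem.List.pyGetD plants r.2.2.2.1 0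
  then r.1 + 1 else r.1

-- ===== PORT B =====
-- the prefix-sum array: S = [0]; for p in plants: S.append(S[-1] + p)
def bPrefixS (plants : List Int) : List Int :=
  plants.foldl (fun S p => S ++ [PySem.List.pyGetD S (-1) 0 + p]) [0]

-- Alice's counting step: state (ra, basea); refill iff S[i+1] - basea > capacityA
def bStepA (S : List Int) (cA : Int) (s : Int × Int) (i : Int) : Int × Int :=
  if PySem.List.pyGetD S (i + 1) 0 - s.2 > cA then (s.1 + 1, PySem.List.pyGetD S i 0) else s

-- Bob's counting step: state (rb, baseb); idx = n-1-j; refill iff baseb - S[idx] > capacityB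
def bStepB (S : List Int) (cB n : Int) (s : Int × Int) (j : Int) : Int × Int :=
  if s.2 - PySem.List.pyGetD S (n - 1 - j) 0 > cB then (s.1 + 1, PySem.List.pyGetD S (n - 1 - j + 1) 0) else s

def minimumRefill1_alt (plants : List Int) (capacityA : Int) (capacityB : Int) : Int :=
  let n : Int := plants.length
  let h : Int := PySem.Int.floordiv n 2
  let S := bPrefixS plants
  let sa := (PySem.List.pyRange 0 h 1).foldl (bStepA S capacityA) (0, 0)
  let sb := (PySem.List.pyRange 0 h 1).foldl (bStepB S capacityB n) (0, PySem.List.pyGetD S n 0)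
  let ans := sa.1 + sb.1
  if PySem.Int.mod n 2 = 1 ∧
      max (capacityA - (PySem.List.pyGetD S h 0 - sa.2))
          (capacityB - (sb.2 - PySem.List.pyGetD S (n - h) 0)) < PySem.List.pyGetD plants h 0
  then ans + 1 else ans

-- ===== PRECONDITION & SPEC =====
def Spec_minimumRefill1 (plants : List Int) (capacityA : Int) (capacityB : Int) (out : Int) : Prop := out = minimumRefill1_alt plants capacityA capacityB
instance (plants : List Int) (capacityA : Int) (capacityB : Int) (out : Int) : Decidable (Spec_minimumRefill1 plants capacityA capacityB out) := by unfold Spec_minimumRefill1; infer_instance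

-- ===== CLAIM (what is proved, stated in full; the proofs are below) =====
def Claim_equal_minimumRefill1 : Prop := ∀ (plants : List Int) (capacityA : Int) (capacityB : Int), Dom_minimumRefill1 plants capacityA capacityB → Spec_minimumRefill1 plants capacityA capacityB (minimumRefill1 plants capacityA capacityB)

-- ===== LEMMAS AND PROOFS =====

-- proof-only intermediate: the plain water-level simulation of one half
def simW (seq : List Int) (cap w : Int) : Int × Int :=
  seq.foldl (fun s p => if s.2 < p then (s.1 + 1, cap - p) else (s.1, s.2 - p)) (0, w)

-- proof-only: running partial sums starting from a
def psums (a : Int) : List Int → List Int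
  | [] => []
  | p :: r => (a + p) :: psums (a + p) r

-- proof-only: the i-th prefix sum of the plants
def pvPS (plants : List Int) (i : Nat) : Int := (plants.take i).sum

-- the refill counter of the simW fold is additive in its starting value
theorem simW_shift (cap : Int) : ∀ (l : List Int) (c w : Int),
    l.foldl (fun s p => if s.2 < p then (s.1 + 1, cap - p) else (s.1, s.2 - p)) (c, w)
      = (c + (simW l cap w).1, (simW l cap w).2) := by
  intro l
  induction l with
  | nil => intro c w; simp [simW]
  | cons p l ih =>
    intro c w
    simp only [simW, List.foldl_cons]
    split_ifs with h
    · rw [ih (c + 1), ih (0 + 1)]; simp [Prod.ext_iff]; omega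
    · rw [ih c, ih 0]; simp

-- peel the head element of a simW run
theorem simW_cons (p : Int) (l : List Int) (cap w : Int) :
    simW (p :: l) cap w =
      ((if w < p then 1 else 0) + (simW l cap ((if w < p then cap else w) - p)).1,
       (simW l cap ((if w < p then cap else w) - p)).2) := by
  by_cases h : w < p
  · simp only [simW, List.foldl_cons, if_pos h]
    rw [simW_shift cap l (0 + 1)]
    norm_num
    exact ⟨rfl, rfl⟩
  · simp only [simW, List.foldl_cons, if_neg h]
    rw [simW_shift cap l 0]
    norm_num

-- the main loop invariant of A: with the untouched segment `mid` between a consumed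
-- prefix `pre` and a reversed-consumed suffix, the loop computes the two
-- independent half simulations
theorem aLoop_split : ∀ (n : Nat) (mid pre suf : List Int) (cA cB ans a b : Int),
    mid.length = n →
    aLoop (pre ++ mid ++ suf) cA cB ans a b (pre.length : Int) ((pre.length : Int) + mid.length - 1) =
      (ans + (simW (mid.take (mid.length / 2)) cA a).1
           + (simW ((mid.drop (mid.length - mid.length / 2)).reverse) cB b).1,
       (simW (mid.take (mid.length / 2)) cA a).2,
       (simW ((mid.drop (mid.length - mid.length / 2)).reverse) cB b).2,
       (pre.length : Int) + mid.length / 2,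
       (pre.length : Int) + mid.length - 1 - mid.length / 2) := by
  intro n
  induction n using Nat.strong_induction_on with
  | _ n IH =>
    intro mid pre suf cA cB ans a b hlen
    match mid with
    | [] =>
      unfold aLoop
      simp [simW]
    | [p] =>
      unfold aLoop
      simp [simW]
    | p :: m :: ms =>
      rcases List.eq_nil_or_concat (m :: ms) with habs | ⟨middle, q, hmq⟩
      · exact absurd habs (by simp)
      rw [List.concat_eq_append] at hmq
      rw [hmq] at hlen
      simp only [List.length_cons, List.length_append] at hlen
      rw [hmq]
      have hL : (p :: (middle ++ [q])).length = middle.length + 2 := by simp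
      -- one unfolding of the loop: the guard holds
      rw [aLoop]
      rw [dif_pos (by push_cast [hL]; omega)]
      -- the two accessed elements are p and q
      have hp : PySem.List.pyGetD (pre ++ (p :: (middle ++ [q])) ++ suf) (pre.length : Int) 0 = p := by
        have h1 : pre ++ (p :: (middle ++ [q])) ++ suf = pre ++ p :: (middle ++ [q] ++ suf) := by simp
        rw [h1, PySem.List.pyGetD_natCast]
        simp [List.getD_eq_getElem?_getD]
      have hq : PySem.List.pyGetD (pre ++ (p :: (middle ++ [q])) ++ suf)
          ((pre.length : Int) + ((p :: (middle ++ [q])).length : Int) - 1) 0 = q := by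
        have h1 : pre ++ (p :: (middle ++ [q])) ++ suf = (pre ++ p :: middle) ++ q :: suf := by simp
        have h2 : (pre.length : Int) + ((p :: (middle ++ [q])).length : Int) - 1
            = (((pre ++ p :: middle).length : Nat) : Int) := by
          simp; ring
        rw [h1, h2, PySem.List.pyGetD_natCast]
        simp [List.getD_eq_getElem?_getD]
      rw [hp, hq]
      -- reassociate the list and indices for the recursive call, then apply the IH
      have hre : pre ++ (p :: (middle ++ [q])) ++ suf = (pre ++ [p]) ++ middle ++ (q :: suf) := by simp
      have hidx1 : (pre.length : Int) + 1 = ((pre ++ [p]).length : Int) := by simp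
      have hidx2 : (pre.length : Int) + ((p :: (middle ++ [q])).length : Int) - 1 - 1
          = ((pre ++ [p]).length : Int) + (middle.length : Int) - 1 := by
        simp; ring
      rw [hre, hidx1, hidx2,
        IH middle.length (by omega) middle (pre ++ [p]) (q :: suf) cA cB _ _ _ rfl]
      -- identify the two half sequences
      have ht : (p :: (middle ++ [q])).take ((p :: (middle ++ [q])).length / 2)
          = p :: middle.take (middle.length / 2) := by
        have : (p :: (middle ++ [q])).length / 2 = middle.length / 2 + 1 := by simp; omega
        rw [this]
        simp [List.take_append_of_le_length (Nat.div_le_self _ _)]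
      have hd : (p :: (middle ++ [q])).drop
            ((p :: (middle ++ [q])).length - (p :: (middle ++ [q])).length / 2)
          = middle.drop (middle.length - middle.length / 2) ++ [q] := by
        have h3 : (p :: (middle ++ [q])).length - (p :: (middle ++ [q])).length / 2
            = (middle.length - middle.length / 2) + 1 := by simp; omega
        rw [h3]
        simp [List.drop_append_of_le_length (by omega : middle.length - middle.length / 2 ≤ middle.length)]
      rw [ht, hd]
      simp only [List.reverse_append, List.reverse_cons, List.reverse_nil, List.nil_append,
        List.singleton_append]
      rw [simW_cons p (middle.take (middle.length / 2)) cA a,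
        simW_cons q ((middle.drop (middle.length - middle.length / 2)).reverse) cB b]
      simp only [aStep]
      split_ifs with h1 h2 h2 <;>
        · simp only [Prod.ext_iff, List.length_append, List.length_cons, List.length_nil, true_and]
          push_cast
          omega

-- the prefix-building fold appends the running partial sums
theorem prefix_foldl : ∀ (l acc : List Int) (a : Int),
    PySem.List.pyGetD acc (-1) 0 = a →
    l.foldl (fun S p => S ++ [PySem.List.pyGetD S (-1) 0 + p]) acc = acc ++ psums a l := by
  intro l
  induction l with
  | nil => intro acc a _; simp [psums]
  | cons p r ih =>
    intro acc a ha
    simp only [List.foldl_cons, ha, psums]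
    rw [ih (acc ++ [a + p]) (a + p)
      (by simp [PySem.List.pyGetD, PySem.List.pyGet?_neg_one_append_singleton])]
    simp

theorem psums_getD : ∀ (l : List Int) (a : Int) (j : Nat), j < l.length →
    (psums a l).getD j 0 = a + (l.take (j + 1)).sum := by
  intro l
  induction l with
  | nil => intro a j hj; simp at hj
  | cons p r ih =>
    intro a j hj
    cases j with
    | zero => simp [psums]
    | succ j =>
      simp only [psums, List.getD_cons_succ, List.take_succ_cons, List.sum_cons]
      rw [ih (a + p) j (by simpa using hj)]
      ring

-- lookup in the prefix-sum array S is the mathematical prefix sum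
theorem Sget (plants : List Int) (i : Nat) (hi : i ≤ plants.length) :
    PySem.List.pyGetD (bPrefixS plants) (i : Int) 0 = pvPS plants i := by
  unfold bPrefixS
  rw [prefix_foldl plants [0] 0 (by decide), PySem.List.pyGetD_natCast]
  cases i with
  | zero => simp [pvPS]
  | succ j =>
    simp only [List.singleton_append, List.getD_cons_succ]
    rw [psums_getD plants 0 j (by omega)]
    simp [pvPS]

-- Alice's prefix-sum counting loop computes the water-level simulation of her half
theorem aliceFold (plants : List Int) (cA : Int) :
    ∀ (k i0 : Nat), i0 + k ≤ plants.length → ∀ (c base : Int),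
    (PySem.List.pyRange (i0 : Int) ((i0 : Int) + (k : Int)) 1).foldl
        (bStepA (bPrefixS plants) cA) (c, base)
      = (c + (simW ((plants.drop i0).take k) cA (cA - (pvPS plants i0 - base))).1,
         pvPS plants (i0 + k)
           + (simW ((plants.drop i0).take k) cA (cA - (pvPS plants i0 - base))).2 - cA) := by
  intro k
  induction k with
  | zero =>
    intro i0 _ c base
    rw [PySem.List.pyRange_one_eq_nil (by omega)]
    simp [simW, Prod.ext_iff]
    omega
  | succ k ih =>
    intro i0 hk c base
    have hi0 : i0 < plants.length := by omega
    rw [PySem.List.pyRange_one_cons (by push_cast; omega)]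
    have hseg : (plants.drop i0).take (k + 1)
        = plants[i0] :: (plants.drop (i0 + 1)).take k := by
      rw [List.drop_eq_getElem_cons hi0, List.take_succ_cons]
    have hps : pvPS plants (i0 + 1) = pvPS plants i0 + plants[i0] := by
      unfold pvPS
      exact List.sum_take_succ plants i0 hi0
    simp only [List.foldl_cons, bStepA]
    have h1 : ((i0 : Int) + 1) = ((i0 + 1 : Nat) : Int) := by push_cast; ring
    rw [h1, Sget plants (i0 + 1) (by omega), Sget plants i0 (by omega)]
    have h2 : (i0 : Int) + ((k : Nat) + 1 : Nat) = ((i0 + 1 : Nat) : Int) + (k : Int) := by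
      push_cast; ring
    rw [h2, hseg, simW_cons]
    by_cases hc : cA - (pvPS plants i0 - base) < plants[i0]
    · simp only [if_pos hc, if_pos (show pvPS plants (i0 + 1) - base > cA by omega)]
      rw [ih (i0 + 1) (by omega) (c + 1) (pvPS plants i0)]
      have hw : cA - (pvPS plants (i0 + 1) - pvPS plants i0) = cA - plants[i0] := by omega
      rw [hw, show i0 + 1 + k = i0 + (k + 1) from by omega]
      exact Prod.ext (by omega) rfl
    · simp only [if_neg hc, if_neg (show ¬ pvPS plants (i0 + 1) - base > cA by omega)]
      rw [ih (i0 + 1) (by omega) c base]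
      have hw : cA - (pvPS plants (i0 + 1) - base) = (cA - (pvPS plants i0 - base)) - plants[i0] := by
        omega
      rw [hw, show i0 + 1 + k = i0 + (k + 1) from by omega]
      exact Prod.ext (by omega) rfl

-- Bob's prefix-sum counting loop computes the water-level simulation of his
-- (right-to-left) half
theorem bobFold (plants : List Int) (cB : Int) :
    ∀ (k j0 : Nat), j0 + k ≤ plants.length → ∀ (c base : Int),
    (PySem.List.pyRange (j0 : Int) ((j0 : Int) + (k : Int)) 1).foldl
        (bStepB (bPrefixS plants) cB (plants.length : Int)) (c, base)
      = (c + (simW ((plants.reverse.drop j0).take k) cB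
                (cB - (base - pvPS plants (plants.length - j0)))).1,
         pvPS plants (plants.length - (j0 + k)) + cB
           - (simW ((plants.reverse.drop j0).take k) cB
                (cB - (base - pvPS plants (plants.length - j0)))).2) := by
  intro k
  induction k with
  | zero =>
    intro j0 _ c base
    rw [PySem.List.pyRange_one_eq_nil (by omega)]
    simp [simW, Prod.ext_iff]
    omega
  | succ k ih =>
    intro j0 hk c base
    have hj0 : j0 < plants.length := by omega
    set idx := plants.length - 1 - j0 with hidx
    have hidxlt : idx < plants.length := by omega
    rw [PySem.List.pyRange_one_cons (by push_cast; omega)]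
    have hrev : plants.reverse[j0]'(by simpa using hj0) = plants[idx] := by
      rw [List.getElem_reverse]
    have hseg : (plants.reverse.drop j0).take (k + 1)
        = plants[idx] :: (plants.reverse.drop (j0 + 1)).take k := by
      rw [List.drop_eq_getElem_cons (by simpa using hj0), List.take_succ_cons, hrev]
    have hps : pvPS plants (idx + 1) = pvPS plants idx + plants[idx] := by
      unfold pvPS
      exact List.sum_take_succ plants idx hidxlt
    simp only [List.foldl_cons, bStepB]
    have h1 : (plants.length : Int) - 1 - (j0 : Int) = ((idx : Nat) : Int) := by
      omega
    rw [h1]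
    rw [show ((idx : Nat) : Int) + 1 = ((idx + 1 : Nat) : Int) by push_cast; ring]
    rw [Sget plants (idx + 1) (by omega), Sget plants idx (by omega)]
    have h3 : (j0 : Int) + ((k : Nat) + 1 : Nat) = ((j0 + 1 : Nat) : Int) + (k : Int) := by
      push_cast; ring
    rw [h3, hseg, simW_cons]
    have hnj : plants.length - j0 = idx + 1 := by omega
    rw [hnj, show ((j0 : Int) + 1) = ((j0 + 1 : Nat) : Int) from by push_cast; ring]
    by_cases hc : cB - (base - pvPS plants (idx + 1)) < plants[idx]
    · simp only [if_pos hc, if_pos (show base - pvPS plants idx > cB by omega)]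
      rw [ih (j0 + 1) (by omega) (c + 1) (pvPS plants (idx + 1))]
      have hnj1 : plants.length - (j0 + 1) = idx := by omega
      rw [hnj1]
      have hw : cB - (pvPS plants (idx + 1) - pvPS plants idx) = cB - plants[idx] := by omega
      rw [hw, show j0 + 1 + k = j0 + (k + 1) from by omega]
      exact Prod.ext (by omega) rfl
    · simp only [if_neg hc, if_neg (show ¬ base - pvPS plants idx > cB by omega)]
      rw [ih (j0 + 1) (by omega) c base]
      have hnj1 : plants.length - (j0 + 1) = idx := by omega
      rw [hnj1]
      have hw : cB - (base - pvPS plants idx) = cB - (base - pvPS plants (idx + 1)) - plants[idx] := by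
        omega
      rw [hw, show j0 + 1 + k = j0 + (k + 1) from by omega]
      exact Prod.ext (by omega) rfl

-- ===== VERDICT (by name: the statement is the Claim_ definition above) =====
theorem minimumRefill1_spec : Claim_equal_minimumRefill1 := by
  intro plants cA cB _dom
  unfold Spec_minimumRefill1 minimumRefill1 minimumRefill1_alt
  have key := aLoop_split plants.length plants [] [] cA cB 0 cA cB rfl
  simp only [List.append_nil, List.nil_append, List.length_nil, Int.natCast_zero, zero_add] at key
  rw [key]
  set n := plants.length with hn
  set h := n / 2 with hh
  dsimp only []
  -- the Int-level h of B is the Nat-level h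
  have hfd : PySem.Int.floordiv (n : Int) 2 = ((h : Nat) : Int) := by
    exact_mod_cast PySem.Int.floordiv_natCast n 2
  rw [hfd]
  -- Alice's pass
  have hA := aliceFold plants cA h 0 (by omega) 0 0
  rw [show ((0 : Nat) : Int) = (0 : Int) by norm_num, zero_add, zero_add] at hA
  simp only [List.drop_zero] at hA
  have hwA : cA - (pvPS plants 0 - 0) = cA := by simp [pvPS]
  rw [hwA] at hA
  -- Bob's pass
  have hB := bobFold plants cB h 0 (by omega) 0 (pvPS plants n)
  rw [show ((0 : Nat) : Int) = (0 : Int) by norm_num, zero_add, zero_add] at hB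
  simp only [List.drop_zero, Nat.sub_zero] at hB
  have hwB : cB - (pvPS plants n - pvPS plants n) = cB := by omega
  rw [hwB] at hB
  have hrevtake : plants.reverse.take h = (plants.drop (n - h)).reverse := by
    rw [List.take_reverse]
  rw [hrevtake] at hB
  rw [← hn] at hB
  rw [Sget plants n (by omega), hA, hB]
  -- identify the index/parity arithmetic and the S-lookups
  have hhn : h ≤ n := Nat.div_le_self n 2
  have hI : ((n : Int)) / 2 = ((h : Nat) : Int) := by omega
  have hmod : PySem.Int.mod (n : Int) 2 = ((n % 2 : Nat) : Int) := by
    exact_mod_cast PySem.Int.mod_natCast n 2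
  have hnh : (n : Int) - ((h : Nat) : Int) = ((n - h : Nat) : Int) := by omega
  rw [hmod, hnh, Sget plants h hhn, Sget plants (n - h) (by omega)]
  have hget : PySem.List.pyGetD plants ((n : Int) / 2) 0 = PySem.List.pyGetD plants ((h : Nat) : Int) 0 := by
    rw [hI]
  have hparity : ((n : Int)) / 2 = (n : Int) - 1 - ((n : Int)) / 2 ↔ (n % 2 : Nat) = 1 := by
    omega
  split_ifs with h1 h2 h2
  · omega
  · exfalso
    apply h2
    refine ⟨by exact_mod_cast hparity.mp (by omega), ?_⟩
    have := h1.2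
    rw [hget] at this
    calc max (cA - (pvPS plants h - (pvPS plants (0 + h) +
            (simW (plants.take h) cA cA).2 - cA)))
          (cB - (pvPS plants (n - (0 + h)) + cB -
            (simW ((plants.drop (n - h)).reverse) cB cB).2 - pvPS plants (n - h)))
        = max (simW (plants.take h) cA cA).2 ((simW ((plants.drop (n - h)).reverse) cB cB).2) := by
          simp only [Nat.zero_add]; omega
      _ < _ := this
  · exfalso
    apply h1
    constructor
    · have : (n % 2 : Nat) = 1 := by exact_mod_cast h2.1
      omega
    · rw [hget]
      have := h2.2
      calc max (simW (plants.take h) cA cA).2 ((simW ((plants.drop (n - h)).reverse) cB cB).2)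
          = max (cA - (pvPS plants h - (pvPS plants (0 + h) +
              (simW (plants.take h) cA cA).2 - cA)))
            (cB - (pvPS plants (n - (0 + h)) + cB -
              (simW ((plants.drop (n - h)).reverse) cB cB).2 - pvPS plants (n - h))) := by
            simp only [Nat.zero_add]; omega
        _ < _ := this
  · omega
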